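-- pv_equiv track=rewrite | github.com/jacob-santelli/ene422 | rl/zoo.py | intersect_supply_demand
-- ===== SOURCE A (Python) =====
-- def intersect_supply_demand(supply, demand):
--     # Sort supply by price
--     supply = sorted(supply, key=lambda x: x[1])
--     intersected = []
--     remaining_demand = demand
--     for s in supply:
--         if s[0] <= remaining_demand:
--             intersected.append((s[0], s[1]))
--             remaining_demand -= s[0]
--         else:
--             intersected.append((remaining_demand, s[1]))
--             remaining_demand = 0
--             break
--     return intersected, remaining_demand
-- ===== SOURCE B (Python) =====
-- def intersect_supply_demand(supply, demand):
--     # Sort supply by price, compute cumulative quantities, cut at the first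
--     # cumulative sum strictly exceeding demand (index-range construction,
--     # no running remaining_demand).
--     sup = sorted(supply, key=lambda x: x[1])
--     cums = []
--     total = 0
--     for q, _ in sup:
--         total += q
--         cums.append(total)
--     cut = next((i for i, c in enumerate(cums) if c > demand), None)
--     if cut is None:
--         return [(q, p) for q, p in sup], demand - total
--     before = cums[cut - 1] if cut > 0 else 0
--     full = [(q, p) for q, p in sup[:cut]]
--     return full + [(demand - before, sup[cut][1])], 0
-- ===== Notes on version B (the rewrite author's own statement) =====
-- stated objective: alternative
-- what changed: Replaces A's running remaining_demand loop with a prefix-sum decomposition: build cumulative quantity sums once, locate the first cumulative sum strictly exceeding demand, and assemble the result from index ranges (full items before the cut, one partial item at the cut).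
import Mathlib
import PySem

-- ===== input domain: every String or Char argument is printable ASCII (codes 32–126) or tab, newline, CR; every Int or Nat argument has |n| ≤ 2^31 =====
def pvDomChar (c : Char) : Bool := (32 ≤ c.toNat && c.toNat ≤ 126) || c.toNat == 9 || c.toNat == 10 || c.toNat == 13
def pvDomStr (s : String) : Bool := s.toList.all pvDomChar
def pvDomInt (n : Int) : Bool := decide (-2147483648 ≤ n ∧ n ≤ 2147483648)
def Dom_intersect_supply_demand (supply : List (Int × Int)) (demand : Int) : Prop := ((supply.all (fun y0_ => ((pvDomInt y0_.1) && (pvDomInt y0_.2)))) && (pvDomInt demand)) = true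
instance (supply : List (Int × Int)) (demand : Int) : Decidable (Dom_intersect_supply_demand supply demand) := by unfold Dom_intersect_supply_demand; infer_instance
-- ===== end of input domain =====

-- B replaces A's running remaining_demand loop by a prefix-sum decomposition
-- (cumulative sums + first index exceeding demand); alternative, same cost.

-- ===== PORT A =====
-- the for-loop of A: state = (remaining_demand, accumulated output, reversed)
def pvLoopA : List (Int × Int) → Int → List (Int × Int) → (List (Int × Int)) × Int
  | [], rem, acc => (acc.reverse, rem)
  | s :: rest, rem, acc =>
    if s.1 ≤ rem then pvLoopA rest (rem - s.1) ((s.1, s.2) :: acc)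
    else (acc.reverse ++ [(rem, s.2)], 0)

def intersect_supply_demand (supply : List (Int × Int)) (demand : Int) : (List (Int × Int)) × Int :=
  pvLoopA (PySem.List.sorted supply (fun x => x.2) false) demand []

-- ===== PORT B =====
-- the cumulative-sum loop of Source B (running total t)
def pvCums : List (Int × Int) → Int → List Int
  | [], _ => []
  | s :: rest, t => (t + s.1) :: pvCums rest (t + s.1)

-- next((i for i, c in enumerate(cums) if c > demand), None)
def pvFindCut (d : Int) : List Int → Option Nat
  | [] => none
  | c :: rest => if c > d then some 0 else (pvFindCut d rest).map (· + 1)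

def intersect_supply_demand_alt (supply : List (Int × Int)) (demand : Int) : (List (Int × Int)) × Int :=
  let sup := PySem.List.sorted supply (fun x => x.2) false
  let cums := pvCums sup 0
  let total := cums.getLastD 0
  match pvFindCut demand cums with
  | none => (sup.map (fun s => (s.1, s.2)), demand - total)
  | some cut =>
    let before := if cut > 0 then cums.getD (cut - 1) 0 else 0
    ((sup.take cut).map (fun s => (s.1, s.2)) ++ [(demand - before, (sup.getD cut (0, 0)).2)], 0)

-- ===== PRECONDITION & SPEC =====
def Spec_intersect_supply_demand (supply : List (Int × Int)) (demand : Int) (out : (List (Int × Int)) × Int) : Prop := out = intersect_supply_demand_alt supply demand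
instance (supply : List (Int × Int)) (demand : Int) (out : (List (Int × Int)) × Int) : Decidable (Spec_intersect_supply_demand supply demand out) := by unfold Spec_intersect_supply_demand; infer_instance

-- ===== CLAIM (what is proved, stated in full; the proofs are below) =====
def Claim_equal_intersect_supply_demand : Prop := ∀ (supply : List (Int × Int)) (demand : Int), Dom_intersect_supply_demand supply demand → Spec_intersect_supply_demand supply demand (intersect_supply_demand supply demand)

-- ===== LEMMAS AND PROOFS =====

-- B's core on an already-sorted list (same body as the alt port after sorting)
def pvBCore (sup : List (Int × Int)) (demand : Int) : (List (Int × Int)) × Int :=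
  let cums := pvCums sup 0
  let total := cums.getLastD 0
  match pvFindCut demand cums with
  | none => (sup.map (fun s => (s.1, s.2)), demand - total)
  | some cut =>
    let before := if cut > 0 then cums.getD (cut - 1) 0 else 0
    ((sup.take cut).map (fun s => (s.1, s.2)) ++ [(demand - before, (sup.getD cut (0, 0)).2)], 0)

theorem alt_eq_bCore (supply : List (Int × Int)) (demand : Int) :
    intersect_supply_demand_alt supply demand
      = pvBCore (PySem.List.sorted supply (fun x => x.2) false) demand := rfl

theorem pvCums_shift (l : List (Int × Int)) : ∀ t, pvCums l t = (pvCums l 0).map (fun c => t + c) := by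
  induction l with
  | nil => intro t; simp [pvCums]
  | cons s rest ih =>
    intro t
    simp only [pvCums, List.map_cons, zero_add, ih (t + s.1), ih s.1, List.map_map]
    congr 1
    apply List.map_congr_left
    intro c _
    simp [Function.comp]
    ring

theorem pvFindCut_shift (d q : Int) (l : List Int) :
    pvFindCut d (l.map (fun c => q + c)) = pvFindCut (d - q) l := by
  induction l with
  | nil => rfl
  | cons c rest ih =>
    simp only [List.map_cons, pvFindCut, ih]
    by_cases hc : c > d - q
    · rw [if_pos (by omega : q + c > d), if_pos hc]
    · rw [if_neg (by omega : ¬ q + c > d), if_neg hc]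

theorem pvFindCut_lt_length (d : Int) (l : List Int) :
    ∀ i, pvFindCut d l = some i → i < l.length := by
  induction l with
  | nil => intro i h; simp [pvFindCut] at h
  | cons c rest ih =>
    intro i h
    rw [pvFindCut] at h
    split at h
    · injection h with h'; subst h'; simp
    · cases hr : pvFindCut d rest with
      | none => rw [hr] at h; simp at h
      | some j =>
        rw [hr] at h
        simp only [Option.map_some] at h
        injection h with h'
        subst h'
        have := ih j hr
        simp only [List.length_cons]
        omega

theorem getLastD_shift (l : List Int) : ∀ q d, (l.map (fun c => q + c)).getLastD (q + d) = q + l.getLastD d := by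
  induction l with
  | nil => intro q d; rfl
  | cons c rest ih =>
    intro q d
    simp only [List.map_cons, List.getLastD_cons, ih]

theorem getD_shift (l : List Int) : ∀ k q, k < l.length → (l.map (fun c => q + c)).getD k 0 = q + l.getD k 0 := by
  induction l with
  | nil => intro k q h; simp at h
  | cons c rest ih =>
    intro k q h
    cases k with
    | zero => rfl
    | succ n =>
      simp only [List.map_cons, List.getD_cons_succ]
      exact ih n q (by simpa using h)

theorem pvBCore_nil (d : Int) : pvBCore [] d = ([], d) := by
  simp [pvBCore, pvCums, pvFindCut]

theorem pvBCore_cons_gt (q p d : Int) (rest : List (Int × Int)) (h : ¬ q ≤ d) :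
    pvBCore ((q, p) :: rest) d = ([(d, p)], 0) := by
  have hdq : d < q := by omega
  simp [pvBCore, pvCums, pvFindCut, hdq]

theorem pvBCore_cons_le (q p d : Int) (rest : List (Int × Int)) (h : q ≤ d) :
    pvBCore ((q, p) :: rest) d
      = ((q, p) :: (pvBCore rest (d - q)).1, (pvBCore rest (d - q)).2) := by
  have h' : ¬ ((0 : Int) + q > d) := by omega
  have hno : ¬ q > d := by omega
  cases hc : pvFindCut (d - q) (pvCums rest 0) with
  | none =>
    have hlast := getLastD_shift (pvCums rest 0) q 0
    rw [add_zero] at hlast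
    simp only [pvBCore, pvCums, zero_add, pvFindCut,
      pvCums_shift rest q, pvFindCut_shift, hc, Option.map_none,
      List.getLastD_cons, hlast, List.map_cons, hno]
    simp only [if_neg not_false]
    have hl : d - (q + (pvCums rest 0).getLastD 0) = d - q - (pvCums rest 0).getLastD 0 := by ring
    rw [hl]
  | some cut0 =>
    have hlen := pvFindCut_lt_length (d - q) (pvCums rest 0) cut0 hc
    cases cut0 with
    | zero =>
      simp only [pvBCore, pvCums, zero_add, pvFindCut,
        pvCums_shift rest q, pvFindCut_shift, hc, Option.map_some, hno]
      simp [List.getD]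
    | succ k =>
      have hk : k < (pvCums rest 0).length := by omega
      simp only [pvBCore, pvCums, zero_add, pvFindCut,
        pvCums_shift rest q, pvFindCut_shift, hc, Option.map_some, hno]
      simp only [if_neg not_false]
      simp only [Nat.add_sub_cancel, List.getD_cons_succ, List.take_succ_cons, List.map_cons]
      rw [if_pos (by omega : k + 1 + 1 > 0), if_pos (by omega : k + 1 > 0),
          getD_shift (pvCums rest 0) k q hk]
      have hv : d - (q + (pvCums rest 0).getD k 0) = d - q - (pvCums rest 0).getD k 0 := by ring
      rw [hv]
      simp

theorem pvLoopA_eq_bCore (l : List (Int × Int)) : ∀ d acc,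
    pvLoopA l d acc = (acc.reverse ++ (pvBCore l d).1, (pvBCore l d).2) := by
  induction l with
  | nil => intro d acc; simp [pvLoopA, pvBCore_nil]
  | cons s rest ih =>
    intro d acc
    obtain ⟨q, p⟩ := s
    by_cases h : q ≤ d
    · rw [pvBCore_cons_le q p d rest h]
      simp only [pvLoopA, if_pos h, ih (d - q) ((q, p) :: acc)]
      simp
    · rw [pvBCore_cons_gt q p d rest h]
      simp [pvLoopA, if_neg h]

-- ===== VERDICT (by name: the statement is the Claim_ definition above) =====
theorem intersect_supply_demand_spec : Claim_equal_intersect_supply_demand := by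
  intro supply demand _
  unfold Spec_intersect_supply_demand
  rw [alt_eq_bCore, intersect_supply_demand, pvLoopA_eq_bCore]
  simp
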